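-- pv_equiv track=rewrite | github.com/JobinJohn24/Secondary-Structure-Predictor | src/structure_predictor.py | extract_motifs
-- ===== SOURCE A (Python) =====
-- from typing import Dict, List, Tuple
--
-- def extract_motifs(structure: str) -> Dict:
--     """Extract secondary structure motifs."""
--     motifs = {
--         'stems': [],
--         'loops': [],
--         'bulges': [],
--         'hairpins': []
--     }
--
--     i = 0
--     while i < len(structure):
--         if structure[i] == '(':
--             stem_start = i
--             while i < len(structure) and structure[i] == '(':
--                 i += 1
--             motifs['stems'].append((stem_start, i - 1))
--         elif structure[i] == '.':
--             loop_start = i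
--             while i < len(structure) and structure[i] == '.':
--                 i += 1
--             motifs['loops'].append((loop_start, i - 1))
--         else:
--             i += 1
--
--     return motifs
-- ===== SOURCE B (Python) =====
-- from typing import Dict
--
-- def extract_motifs(structure: str) -> Dict:
--     """Extract secondary structure motifs (run-boundary detection + zip)."""
--     n = len(structure)
--
--     def spans(c):
--         starts = [i for i in range(n)
--                   if structure[i] == c and (i == 0 or structure[i - 1] != c)]
--         ends = [i for i in range(n)
--                 if structure[i] == c and (i == n - 1 or structure[i + 1] != c)]
--         return list(zip(starts, ends))
--
--     return {'stems': spans('('), 'loops': spans('.'),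
--             'bulges': [], 'hairpins': []}
-- ===== Notes on version B (the rewrite author's own statement) =====
-- stated objective: alternative
-- what changed: Replaces A's single-pass run-consuming while loop by boundary detection: two index comprehensions collect run-start positions (char matches, predecessor differs) and run-end positions (char matches, successor differs), zipped pairwise into spans, done independently per character class.
import Mathlib
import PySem

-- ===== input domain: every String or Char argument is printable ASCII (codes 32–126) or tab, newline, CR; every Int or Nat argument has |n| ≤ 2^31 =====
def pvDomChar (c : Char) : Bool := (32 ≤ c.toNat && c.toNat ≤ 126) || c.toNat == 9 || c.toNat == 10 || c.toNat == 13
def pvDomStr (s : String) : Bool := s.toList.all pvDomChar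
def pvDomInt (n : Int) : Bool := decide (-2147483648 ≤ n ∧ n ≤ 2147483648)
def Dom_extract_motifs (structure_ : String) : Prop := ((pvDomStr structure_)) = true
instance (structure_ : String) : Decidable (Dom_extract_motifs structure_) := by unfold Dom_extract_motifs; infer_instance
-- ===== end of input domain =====

-- B replaces A's run-consuming while loop by per-class boundary detection: index comprehensions
-- for run starts (predecessor differs) and run ends (successor differs), zipped into spans.


-- ===== PORT A =====

-- inner 'while i < len(structure) and structure[i] == ch: i += 1': final i and unread suffix
def consumeRun (ch : Char) : List Char → Int → Int × List Char
  | [], i => (i, [])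
  | c :: rest, i => if c = ch then consumeRun ch rest (i + 1) else (i, c :: rest)

theorem consumeRun_len (ch : Char) (l : List Char) (i : Int) :
    (consumeRun ch l i).2.length ≤ l.length := by
  induction l generalizing i with
  | nil => simp [consumeRun]
  | cons c rest ih =>
    simp only [consumeRun]
    split
    · exact le_trans (ih _) (Nat.le_succ _)
    · simp

-- A's outer while over the unread suffix, carrying i and the stems/loops accumulators
def aLoop : List Char → Int → List (Int × Int) → List (Int × Int) → List (Int × Int) × List (Int × Int)
  | [], _, stems, loops => (stems, loops)
  | c :: rest, i, stems, loops =>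
    if c = '(' then
      let r := consumeRun '(' rest (i + 1)
      aLoop r.2 r.1 (stems ++ [(i, r.1 - 1)]) loops
    else if c = '.' then
      let r := consumeRun '.' rest (i + 1)
      aLoop r.2 r.1 stems (loops ++ [(i, r.1 - 1)])
    else
      aLoop rest (i + 1) stems loops
termination_by l => l.length
decreasing_by
  · exact Nat.lt_succ_of_le (consumeRun_len _ _ _)
  · exact Nat.lt_succ_of_le (consumeRun_len _ _ _)
  · exact Nat.lt_succ_self _

def extract_motifs (structure_ : String) : List (String × List (Int × Int)) :=
  let r := aLoop structure_.toList 0 [] []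
  [("stems", r.1), ("loops", r.2), ("bulges", []), ("hairpins", [])]

-- ===== PORT B =====
-- '[i for i in range(n) if structure[i] == c and (i == 0 or structure[i-1] != c)]'
def startsB (c : Char) (l : List Char) : List Nat :=
  (List.range l.length).filter (fun i => l[i]? == some c && (i == 0 || l[i-1]? != some c))

-- '[i for i in range(n) if structure[i] == c and (i == n-1 or structure[i+1] != c)]'
def endsB (c : Char) (l : List Char) : List Nat :=
  (List.range l.length).filter (fun i => l[i]? == some c && (i == l.length - 1 || l[i+1]? != some c))

-- 'list(zip(starts, ends))'
def spansB (c : Char) (l : List Char) : List (Int × Int) :=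
  ((startsB c l).map (Int.ofNat ·)).zip ((endsB c l).map (Int.ofNat ·))

def extract_motifs_alt (structure_ : String) : List (String × List (Int × Int)) :=
  [("stems", spansB '(' structure_.toList), ("loops", spansB '.' structure_.toList),
   ("bulges", []), ("hairpins", [])]

-- ===== PRECONDITION & SPEC =====
def Spec_extract_motifs (structure_ : String) (out : List (String × List (Int × Int))) : Prop := out = extract_motifs_alt structure_
instance (structure_ : String) (out : List (String × List (Int × Int))) : Decidable (Spec_extract_motifs structure_ out) := by unfold Spec_extract_motifs; infer_instance

-- ===== CLAIM (what is proved, stated in full; the proofs are below) =====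
def Claim_equal_extract_motifs : Prop := ∀ (structure_ : String), Dom_extract_motifs structure_ → Spec_extract_motifs structure_ (extract_motifs structure_)

-- ===== LEMMAS AND PROOFS =====

-- reference: the spans of maximal c-runs, consumed left to right
def runSpans (c : Char) : List Char → Int → List (Int × Int)
  | [], _ => []
  | x :: rest, i =>
    if x = c then
      let r := consumeRun c rest (i + 1)
      (i, r.1 - 1) :: runSpans c r.2 r.1
    else runSpans c rest (i + 1)
termination_by l => l.length
decreasing_by
  · exact Nat.lt_succ_of_le (consumeRun_len _ _ _)
  · exact Nat.lt_succ_self _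

theorem consumeRun_eq (ch : Char) (l : List Char) (i : Int) :
    consumeRun ch l i = (i + (l.takeWhile (· = ch)).length, l.dropWhile (· = ch)) := by
  induction l generalizing i with
  | nil => simp [consumeRun]
  | cons c rest ih =>
    by_cases h : c = ch
    · simp [consumeRun, h, ih]; ring
    · simp [consumeRun, h]

-- start positions, with an explicit virtual previous character
def sGen (c : Char) (p : Option Char) : List Char → List Nat
  | [] => []
  | x :: rest =>
    (if x = c ∧ p ≠ some c then [0] else []) ++ (sGen c (some x) rest).map (· + 1)

-- end positions
def eGen (c : Char) : List Char → List Nat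
  | [] => []
  | x :: rest =>
    (if x = c ∧ rest.head? ≠ some c then [0] else []) ++ (eGen c rest).map (· + 1)

theorem startsB_gen (c : Char) (p0 : Option Char) (l : List Char) :
    (List.range l.length).filter
      (fun i => l[i]? == some c && ((if i = 0 then p0 else l[i-1]?) != some c)) = sGen c p0 l := by
  induction l generalizing p0 with
  | nil => simp [sGen]
  | cons x rest ih =>
    rw [List.length_cons, List.range_succ_eq_map, List.filter_cons, List.filter_map]
    have hpred : ((fun i => (x :: rest)[i]? == some c && ((if i = 0 then p0 else (x :: rest)[i-1]?) != some c)) ∘ Nat.succ)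
        = (fun i => rest[i]? == some c && ((if i = 0 then some x else rest[i-1]?) != some c)) := by
      funext i; cases i <;> simp [Function.comp]
    rw [hpred, ih (some x), sGen]
    have hmap : List.map Nat.succ (sGen c (some x) rest) = List.map (· + 1) (sGen c (some x) rest) := by
      simp
    by_cases h : x = c ∧ p0 ≠ some c
    · simp [h.1, h.2]
    · rcases not_and_or.mp h with h1 | h1
      · simp [h1, hmap]
      · simp [not_not.mp h1, hmap]

theorem startsB_eq (c : Char) (l : List Char) : startsB c l = sGen c none l := by
  rw [← startsB_gen]
  unfold startsB
  congr 1
  funext i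
  cases i <;> simp

theorem endsB_eq (c : Char) (l : List Char) :
    endsB c l = (List.range l.length).filter (fun i => l[i]? == some c && l[i+1]? != some c) := by
  unfold endsB
  apply List.filter_congr
  intro i hi
  rw [List.mem_range] at hi
  by_cases h : i = l.length - 1
  · have h2 : l[i+1]? = none := List.getElem?_eq_none (by omega)
    simp [h2, (show ((none : Option Char) != some c) = true from rfl)]
  · have h2 : (i == l.length - 1) = false := by simpa using h
    simp [h2]

theorem endsB_gen (c : Char) (l : List Char) :
    (List.range l.length).filter (fun i => l[i]? == some c && l[i+1]? != some c) = eGen c l := by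
  induction l with
  | nil => simp [eGen]
  | cons x rest ih =>
    rw [List.length_cons, List.range_succ_eq_map, List.filter_cons, List.filter_map]
    have hpred : ((fun i => (x :: rest)[i]? == some c && (x :: rest)[i+1]? != some c) ∘ Nat.succ)
        = (fun i => rest[i]? == some c && rest[i+1]? != some c) := by
      funext i; simp [Function.comp]
    rw [hpred, ih, eGen]
    have hmap : List.map Nat.succ (eGen c rest) = List.map (· + 1) (eGen c rest) := by simp
    have hh : rest.head? = rest[0]? := by cases rest <;> rfl
    rw [hh]
    by_cases hx : x = c <;> by_cases hr : rest[0]? = some c <;>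
      simp [hx, hr, hmap]

theorem sGen_head_ne (c : Char) (p q : Option Char) (l : List Char) (h : l.head? ≠ some c) :
    sGen c p l = sGen c q l := by
  cases l with
  | nil => rfl
  | cons x rest =>
    have hx : x ≠ c := by simpa using h
    simp [sGen, hx]

theorem sGen_prev_ne (c : Char) (p : Option Char) (hp : p ≠ some c) (l : List Char) :
    sGen c p l = sGen c none l := by
  cases l with
  | nil => rfl
  | cons x rest =>
    simp only [sGen]
    congr 1
    by_cases hx : x = c <;> simp [hx, hp]

theorem sGen_run (c : Char) (t r : List Char) (ht : ∀ y ∈ t, y = c) :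
    sGen c (some c) (t ++ r) = (sGen c (some c) r).map (· + t.length) := by
  induction t with
  | nil => simp
  | cons y t ih =>
    have hy : y = c := ht y (by simp)
    rw [List.cons_append, sGen, hy]
    rw [if_neg (by simp : ¬(c = c ∧ (some c : Option Char) ≠ some c))]
    rw [List.nil_append, ih (fun z hz => ht z (by simp [hz])), List.map_map]
    congr 1
theorem eGen_run (c : Char) (t r : List Char) (ht : ∀ y ∈ t, y = c) (hr : r.head? ≠ some c) :
    eGen c (c :: (t ++ r)) = t.length :: (eGen c r).map (· + (t.length + 1)) := by
  induction t with
  | nil =>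
    rw [eGen, List.nil_append, if_pos ⟨rfl, hr⟩]
    simp
  | cons y t ih =>
    have hy : y = c := ht y (by simp)
    rw [eGen]
    rw [if_neg (by simp [hy] : ¬(c = c ∧ ((y :: t) ++ r).head? ≠ some c))]
    rw [List.cons_append, hy]
    rw [ih (fun z hz => ht z (by simp [hz]))]
    simp only [List.map_cons, List.map_map, List.nil_append, List.length_cons]
    congr 1
theorem runSpans_skip (c : Char) (t r : List Char) (ht : ∀ y ∈ t, y ≠ c) (i : Int) :
    runSpans c (t ++ r) i = runSpans c r (i + t.length) := by
  induction t generalizing i with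
  | nil => simp
  | cons y t ih =>
    have hy : y ≠ c := ht y (by simp)
    rw [List.cons_append, runSpans, if_neg hy, ih (fun z hz => ht z (by simp [hz]))]
    congr 1
    simp only [List.length_cons]
    push_cast
    ring

theorem head?_dropWhile_ne (c : Char) (l : List Char) :
    (l.dropWhile (· = c)).head? ≠ some c := by
  induction l with
  | nil => simp
  | cons x rest ih =>
    by_cases hx : x = c
    · simpa [hx] using ih
    · simp [hx]

theorem zip_eq_runSpans (c : Char) (l : List Char) (i : Int) :
    ((sGen c none l).map (fun n : Nat => i + (n : Int))).zip
        ((eGen c l).map (fun n : Nat => i + (n : Int)))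
      = runSpans c l i := by
  induction hn : l.length using Nat.strong_induction_on generalizing l i with
  | _ n ih =>
  cases l with
  | nil => simp [sGen, eGen, runSpans]
  | cons x rest =>
    subst hn
    by_cases hx : x = c
    · subst hx
      set t := rest.takeWhile (· = x) with hT
      set r := rest.dropWhile (· = x) with hR
      have hrest : rest = t ++ r := (List.takeWhile_append_dropWhile).symm
      have htc : ∀ y ∈ t, y = x := fun y hy => by
        simpa using List.mem_takeWhile_imp (p := (· = x)) (hT ▸ hy)
      have hrh : r.head? ≠ some x := hR ▸ head?_dropWhile_ne x rest
      have hs : sGen x none (x :: rest)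
          = 0 :: ((sGen x none r).map (· + (t.length + 1))) := by
        rw [sGen, if_pos ⟨rfl, by simp⟩]
        rw [hrest, sGen_run x t r htc, sGen_head_ne x (some x) none r hrh]
        rw [List.map_map]
        congr 2
      have he : eGen x (x :: rest) = t.length :: ((eGen x r).map (· + (t.length + 1))) :=
        hrest ▸ eGen_run x t r htc hrh
      rw [hs, he]
      rw [runSpans, if_pos rfl]
      simp only [consumeRun_eq, ← hT, ← hR]
      have hlen : r.length < (x :: rest).length := by
        rw [hR]
        simpa using Nat.lt_succ_of_le (List.length_dropWhile_le _ rest)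
      rw [List.map_cons, List.map_cons, List.zip_cons_cons]
      rw [List.map_map, List.map_map]
      have hcomp : ((fun n : Nat => i + (n : Int)) ∘ (· + (t.length + 1)))
          = (fun n : Nat => (i + 1 + (t.length : Int)) + (n : Int)) := by
        funext m; simp [Function.comp]; ring
      rw [hcomp]
      rw [ih r.length hlen r (i + 1 + (t.length : Int)) rfl]
      norm_num
      ring
    · have hs : sGen c none (x :: rest) = (sGen c none rest).map (· + 1) := by
        rw [sGen, if_neg (by simp [hx])]
        rw [sGen_prev_ne c (some x) (by simpa using hx) rest]
        simp
      have he : eGen c (x :: rest) = (eGen c rest).map (· + 1) := by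
        rw [eGen, if_neg (by simp [hx])]
        simp
      rw [hs, he, List.map_map, List.map_map]
      have hcomp : ((fun n : Nat => i + (n : Int)) ∘ (· + 1))
          = (fun n : Nat => (i + 1) + (n : Int)) := by
        funext m; simp [Function.comp]; ring
      rw [hcomp]
      rw [ih rest.length (by simp) rest (i + 1) rfl]
      rw [runSpans, if_neg hx]

theorem aLoop_eq (l : List Char) (i : Int) (s lo : List (Int × Int)) :
    aLoop l i s lo = (s ++ runSpans '(' l i, lo ++ runSpans '.' l i) := by
  induction hn : l.length using Nat.strong_induction_on generalizing l i s lo with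
  | _ n ih =>
  cases l with
  | nil => simp [aLoop, runSpans]
  | cons x rest =>
    subst hn
    have hlen : ∀ p : Char, (rest.dropWhile (· = p)).length < (x :: rest).length := by
      intro p
      simpa using Nat.lt_succ_of_le (List.length_dropWhile_le _ rest)
    by_cases h1 : x = '('
    · subst h1
      rw [aLoop, if_pos rfl]
      simp only [consumeRun_eq]
      rw [ih _ (hlen '(') _ _ _ _ rfl]
      rw [runSpans, if_pos rfl]
      simp only [consumeRun_eq]
      have hr : runSpans '.' ('(' :: rest) i
          = runSpans '.' (rest.dropWhile (· = '(')) (i + 1 + (rest.takeWhile (· = '(')).length) := by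
        rw [runSpans, if_neg (by decide)]
        conv_lhs => rw [show rest = rest.takeWhile (· = '(') ++ rest.dropWhile (· = '(') from
          (List.takeWhile_append_dropWhile).symm]
        rw [runSpans_skip '.' _ _ (fun y hy => by
          have := List.mem_takeWhile_imp hy; simp at this; simp [this]) (i+1)]
      rw [hr]
      simp
    · by_cases h2 : x = '.'
      · subst h2
        rw [aLoop, if_neg (by decide), if_pos rfl]
        simp only [consumeRun_eq]
        rw [ih _ (hlen '.') _ _ _ _ rfl]
        rw [show runSpans '.' ('.' :: rest) i
            = (i, (i + 1 + ((rest.takeWhile (· = '.')).length : Int)) - 1)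
              :: runSpans '.' (rest.dropWhile (· = '.')) (i + 1 + (rest.takeWhile (· = '.')).length) from by
          rw [runSpans, if_pos rfl]; simp [consumeRun_eq]]
        have hr : runSpans '(' ('.' :: rest) i
            = runSpans '(' (rest.dropWhile (· = '.')) (i + 1 + (rest.takeWhile (· = '.')).length) := by
          rw [runSpans, if_neg (by decide)]
          conv_lhs => rw [show rest = rest.takeWhile (· = '.') ++ rest.dropWhile (· = '.') from
            (List.takeWhile_append_dropWhile).symm]
          rw [runSpans_skip '(' _ _ (fun y hy => by
            have := List.mem_takeWhile_imp hy; simp at this; simp [this]) (i+1)]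
        rw [hr]
        simp
      · rw [aLoop, if_neg h1, if_neg h2]
        rw [ih rest.length (by simp) _ _ _ _ rfl]
        rw [show runSpans '(' (x :: rest) i = runSpans '(' rest (i+1) from by
          rw [runSpans, if_neg h1]]
        rw [show runSpans '.' (x :: rest) i = runSpans '.' rest (i+1) from by
          rw [runSpans, if_neg h2]]

theorem spansB_eq (c : Char) (l : List Char) : spansB c l = runSpans c l 0 := by
  unfold spansB
  rw [startsB_eq, endsB_eq, endsB_gen]
  have h : ∀ m : List Nat, m.map (Int.ofNat ·) = m.map (fun n : Nat => (0 : Int) + (n : Int)) := by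
    intro m; apply List.map_congr_left; intro a _; simp
  rw [h (sGen c none l), h (eGen c l)]
  exact zip_eq_runSpans c l 0

-- ===== VERDICT (by name: the statement is the Claim_ definition above) =====
theorem extract_motifs_spec : Claim_equal_extract_motifs := by
  intro structure_ _
  unfold Spec_extract_motifs extract_motifs extract_motifs_alt
  rw [aLoop_eq, spansB_eq, spansB_eq]
  simp
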